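-- pv_equiv track=rewrite | github.com/Tarjeison/KebabOfCode | 2021/vetle/day8/8.py | strings_equal
-- ===== SOURCE A (Python) =====
-- def strings_equal(decoder, code):
--     for char in code:
--         if char not in decoder:
--             return False
--     for char in decoder:
--         if char not in code:
--             return False
--     return True
-- ===== SOURCE B (Python) =====
-- def strings_equal(decoder, code):
--     mark = {}
--     for ch in decoder:
--         mark[ch] = mark.get(ch, 0) | 1
--     for ch in code:
--         mark[ch] = mark.get(ch, 0) | 2
--     return all(v == 3 for v in mark.values())
-- ===== Notes on version B (the rewrite author's own statement) =====
-- stated objective: alternative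
-- what changed: Replaces the two mutual membership-scan loops with a single-pass bitmask dictionary: each character is marked with bit 1 (from decoder) or bit 2 (from code), and equality of the character sets holds iff every recorded mark equals 3.
import Mathlib
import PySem

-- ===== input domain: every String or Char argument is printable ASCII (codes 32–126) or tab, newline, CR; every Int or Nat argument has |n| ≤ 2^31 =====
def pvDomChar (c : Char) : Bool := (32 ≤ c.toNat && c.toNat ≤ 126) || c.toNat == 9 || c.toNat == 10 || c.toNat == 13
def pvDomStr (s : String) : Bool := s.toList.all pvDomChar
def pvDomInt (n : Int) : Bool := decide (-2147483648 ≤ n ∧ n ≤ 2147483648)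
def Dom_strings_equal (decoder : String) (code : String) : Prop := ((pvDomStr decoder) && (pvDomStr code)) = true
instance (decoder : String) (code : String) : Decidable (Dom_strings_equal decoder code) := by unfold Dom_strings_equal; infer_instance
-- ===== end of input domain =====

-- B replaces A's two mutual membership-scan loops by a single-pass bitmask dictionary
-- (bit 1 = seen in decoder, bit 2 = seen in code; the character sets are equal iff every mark is 3): alternative algorithm.

-- ===== PORT A =====
-- 'for char in needles: if char not in haystack: return False' (falls through to the next statement with true)
def seLoop (needles haystack : List Char) : Bool :=
  match needles with
  | [] => true
  | c :: rest => if haystack.contains c then seLoop rest haystack else false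

def strings_equal (decoder : String) (code : String) : Bool :=
  if seLoop code.toList decoder.toList then
    seLoop decoder.toList code.toList
  else false

-- ===== PORT B =====
-- 'for ch in chars: mark[ch] = mark.get(ch, 0) | bit'
def seMark (chars : List Char) (bit : Int) (d : PySem.Dict Char Int) : PySem.Dict Char Int :=
  chars.foldl (fun d c => d.insert c (PySem.Int.bor (d.getD c 0) bit)) d

def strings_equal_alt (decoder : String) (code : String) : Bool :=
  (seMark code.toList 2 (seMark decoder.toList 1 PySem.Dict.empty)).values.all (fun v => v == 3)

-- ===== PRECONDITION & SPEC =====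
def Spec_strings_equal (decoder : String) (code : String) (out : Bool) : Prop := out = strings_equal_alt decoder code
instance (decoder : String) (code : String) (out : Bool) : Decidable (Spec_strings_equal decoder code out) := by unfold Spec_strings_equal; infer_instance

-- ===== CLAIM (what is proved, stated in full; the proofs are below) =====
def Claim_equal_strings_equal : Prop := ∀ (decoder : String) (code : String), Dom_strings_equal decoder code → Spec_strings_equal decoder code (strings_equal decoder code)

-- ===== LEMMAS AND PROOFS =====
theorem seLoop_eq_true_iff (needles haystack : List Char) :
    seLoop needles haystack = true ↔ ∀ c ∈ needles, c ∈ haystack := by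
  induction needles with
  | nil => simp [seLoop]
  | cons c rest ih =>
    simp only [seLoop]
    by_cases h : c ∈ haystack
    · simp [h, ih]
    · simp [h]

theorem bor_nonneg_of_nonneg {a b : Int} (ha : 0 ≤ a) (hb : 0 ≤ b) :
    0 ≤ PySem.Int.bor a b := by
  rw [PySem.Int.bor_of_nonneg ha hb]; positivity

theorem bor_bor_self {a b : Int} (ha : 0 ≤ a) (hb : 0 ≤ b) :
    PySem.Int.bor (PySem.Int.bor a b) b = PySem.Int.bor a b := by
  rw [PySem.Int.bor_of_nonneg ha hb, PySem.Int.bor_of_nonneg (by positivity) hb]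
  simp

theorem getD_seMark (chars : List Char) (bit : Int) (d : PySem.Dict Char Int) (c : Char)
    (hb : 0 ≤ bit) (hd : ∀ x, 0 ≤ d.getD x 0) :
    (seMark chars bit d).getD c 0 =
      if c ∈ chars then PySem.Int.bor (d.getD c 0) bit else d.getD c 0 := by
  induction chars generalizing d with
  | nil => simp [seMark]
  | cons x rest ih =>
    simp only [seMark, List.foldl_cons] at *
    rw [ih _ (fun y => by
      rw [PySem.Dict.getD_insert]
      split
      · exact bor_nonneg_of_nonneg (hd x) hb
      · exact hd y)]
    by_cases hx : c = x
    · subst hx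
      simp only [PySem.Dict.getD_insert, List.mem_cons, true_or, if_pos]
      split
      · exact bor_bor_self (hd c) hb
      · rfl
    · simp [PySem.Dict.getD_insert, hx]

theorem keys_seMark_nodup (chars : List Char) (bit : Int) (d : PySem.Dict Char Int)
    (h : d.keys.Nodup) : (seMark chars bit d).keys.Nodup :=
  PySem.Dict.nodup_keys_foldl_insert chars _ d h

theorem mem_keys_seMark (chars : List Char) (bit : Int) (d : PySem.Dict Char Int) (c : Char) :
    c ∈ (seMark chars bit d).keys ↔ c ∈ d.keys ∨ c ∈ chars := by
  rw [seMark, PySem.Dict.keys_foldl_insert, PySem.Set.mem_update]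

-- the final mark of character c, by membership in the two strings
theorem getD_mark (D C : List Char) (c : Char) :
    (seMark C 2 (seMark D 1 PySem.Dict.empty)).getD c 0 =
      (if c ∈ D then (1 : Int) else 0) + (if c ∈ C then 2 else 0) := by
  rw [getD_seMark _ _ _ _ (by norm_num) (fun x => by
    rw [getD_seMark _ _ _ _ (by norm_num) (fun _ => by simp [PySem.Dict.getD_empty])]
    split
    · simp [PySem.Dict.getD_empty]; decide
    · simp [PySem.Dict.getD_empty]),
    getD_seMark _ _ _ _ (by norm_num) (fun _ => by simp [PySem.Dict.getD_empty])]
  simp only [PySem.Dict.getD_empty]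
  by_cases hD : c ∈ D <;> by_cases hC : c ∈ C <;> simp [hD, hC] <;> decide

theorem alt_eq_true_iff (decoder code : String) :
    strings_equal_alt decoder code = true ↔
      ∀ c, c ∈ decoder.toList ∨ c ∈ code.toList → (c ∈ decoder.toList ∧ c ∈ code.toList) := by
  unfold strings_equal_alt
  have hnd : (seMark code.toList 2 (seMark decoder.toList 1 PySem.Dict.empty)).keys.Nodup :=
    keys_seMark_nodup _ _ _ (keys_seMark_nodup _ _ _ PySem.Dict.nodup_keys_empty)
  rw [PySem.Dict.values_eq_map_keys _ hnd 0]
  simp only [List.all_map, List.all_eq_true, Function.comp, beq_iff_eq]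
  constructor
  · intro h c hc
    have hk : c ∈ (seMark code.toList 2 (seMark decoder.toList 1 PySem.Dict.empty)).keys := by
      rw [mem_keys_seMark, mem_keys_seMark]
      simp only [PySem.Dict.keys_empty, List.not_mem_nil, false_or]
      tauto
    have := h c hk
    rw [getD_mark] at this
    by_cases hD : c ∈ decoder.toList <;> by_cases hC : c ∈ code.toList <;>
      simp [hD, hC] at this ⊢
  · intro h c hk
    rw [mem_keys_seMark, mem_keys_seMark] at hk
    simp only [PySem.Dict.keys_empty, List.not_mem_nil, false_or] at hk
    have hc := h c (by tauto)
    rw [getD_mark]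
    simp [hc.1, hc.2]

-- ===== VERDICT (by name: the statement is the Claim_ definition above) =====
theorem strings_equal_spec : Claim_equal_strings_equal := by
  intro decoder code _
  unfold Spec_strings_equal
  by_cases hb : strings_equal_alt decoder code = true
  · rw [hb]
    rw [alt_eq_true_iff] at hb
    unfold strings_equal
    have h1 : seLoop code.toList decoder.toList = true :=
      (seLoop_eq_true_iff _ _).mpr (fun c hc => (hb c (Or.inr hc)).1)
    have h2 : seLoop decoder.toList code.toList = true :=
      (seLoop_eq_true_iff _ _).mpr (fun c hc => (hb c (Or.inl hc)).2)
    simp [h1, h2]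
  · rw [Bool.not_eq_true] at hb
    rw [hb, Bool.eq_false_iff]
    intro hA
    unfold strings_equal at hA
    split_ifs at hA with h1
    · have halt : strings_equal_alt decoder code = true := by
        rw [alt_eq_true_iff]
        intro c hc
        rcases hc with h | h
        · exact ⟨h, (seLoop_eq_true_iff _ _).mp hA _ h⟩
        · exact ⟨(seLoop_eq_true_iff _ _).mp h1 _ h, h⟩
      simp [halt] at hb
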